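-- pv_equiv track=rewrite | github.com/kabomekgwe/gospel-keys | backend/app/pipeline/harmonic_function_analyzer.py | _analyze_harmonic_rhythm
-- ===== SOURCE A (Python) =====
-- from typing import List, Dict, Optional, Tuple
--
-- def _analyze_harmonic_rhythm(sequence: List[str]) -> str:
--     """Analyze the T-S-D flow pattern"""
--     if not sequence:
--         return "empty"
--
--     # Common patterns
--     patterns = {
--         ("T", "S", "D", "T"): "classical_cadence",
--         ("T", "D", "T"): "simple_resolution",
--         ("S", "D", "T"): "cadential",
--         ("T", "S", "T"): "plagal_motion",
--     }
--
--     # Check for pattern matches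
--     seq_tuple = tuple(sequence[-4:]) if len(sequence) >= 4 else tuple(sequence)
--
--     for pattern, name in patterns.items():
--         if seq_tuple == pattern:
--             return name
--
--     # Count transitions
--     t_to_s = sum(1 for i in range(len(sequence)-1)
--                  if sequence[i] == "T" and sequence[i+1] == "S")
--     s_to_d = sum(1 for i in range(len(sequence)-1)
--                  if sequence[i] == "S" and sequence[i+1] == "D")
--     d_to_t = sum(1 for i in range(len(sequence)-1)
--                  if sequence[i] == "D" and sequence[i+1] == "T")
--
--     if d_to_t > 0:
--         return "resolving"
--     elif s_to_d > 0:
--         return "building_tension"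
--     else:
--         return "static"
-- ===== SOURCE B (Python) =====
-- def _analyze_harmonic_rhythm(sequence):
--     """Analyze the T-S-D flow pattern"""
--     if not sequence:
--         return "empty"
--
--     patterns = {
--         ("T", "S", "D", "T"): "classical_cadence",
--         ("T", "D", "T"): "simple_resolution",
--         ("S", "D", "T"): "cadential",
--         ("T", "S", "T"): "plagal_motion",
--     }
--
--     tail = tuple(sequence[-4:] if len(sequence) >= 4 else sequence)
--     name = patterns.get(tail)
--     if name is not None:
--         return name
--
--     # One pass over adjacent pairs, maintaining existence flags
--     has_dt = has_sd = False
--     for a, b in zip(sequence, sequence[1:]):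
--         if a == "D" and b == "T":
--             has_dt = True
--         elif a == "S" and b == "D":
--             has_sd = True
--
--     return "resolving" if has_dt else "building_tension" if has_sd else "static"
-- ===== Notes on version B (the rewrite author's own statement) =====
-- stated objective: simpler
-- what changed: Replaces the for-loop over patterns.items() with a direct dict lookup and fuses the three separate index-based counting comprehensions into one pass over zip(sequence, sequence[1:]) maintaining two existence flags (the unused t_to_s count is dropped).
import Mathlib
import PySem

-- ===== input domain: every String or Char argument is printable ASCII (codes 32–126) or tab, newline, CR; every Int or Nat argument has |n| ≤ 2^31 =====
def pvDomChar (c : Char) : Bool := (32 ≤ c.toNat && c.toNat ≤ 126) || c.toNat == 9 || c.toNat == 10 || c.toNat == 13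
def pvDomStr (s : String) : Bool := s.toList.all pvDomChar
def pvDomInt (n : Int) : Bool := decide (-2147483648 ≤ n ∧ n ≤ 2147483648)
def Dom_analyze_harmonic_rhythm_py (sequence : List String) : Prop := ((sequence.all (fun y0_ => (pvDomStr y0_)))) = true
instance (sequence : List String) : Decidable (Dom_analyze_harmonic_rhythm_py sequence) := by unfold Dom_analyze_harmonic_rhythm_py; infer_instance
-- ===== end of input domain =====

-- B keeps A's exact pattern-table semantics but replaces the items() loop with a direct dict lookup and fuses A's three index-based counting scans into one pass over adjacent pairs keeping two existence flags (objective: simpler).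


-- ===== PORT A =====
-- table of patterns, in Python's literal order
def pvPatternsA : List (List String × String) :=
  [(["T","S","D","T"], "classical_cadence"),
   (["T","D","T"], "simple_resolution"),
   (["S","D","T"], "cadential"),
   (["T","S","T"], "plagal_motion")]

-- the `for pattern, name in patterns.items(): if seq_tuple == pattern: return name` loop
def pvFindPattern (seq : List String) : List (List String × String) → Option String
  | [] => none
  | (p, n) :: rest => if seq = p then some n else pvFindPattern seq rest

-- `sum(1 for i in range(len(sequence)-1) if sequence[i] == a and sequence[i+1] == b)`
-- (indices are always in range, so the defaulted get is exact here)
def pvCountTrans (sequence : List String) (a b : String) : Int :=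
  ((PySem.List.pyRange 0 ((sequence.length : Int) - 1) 1).map (fun i =>
    if PySem.List.pyGetD sequence i "" = a ∧ PySem.List.pyGetD sequence (i + 1) "" = b
    then (1 : Int) else 0)).sum

def analyze_harmonic_rhythm_py (sequence : List String) : String :=
  if sequence = [] then "empty"
  else
    let seq_tuple := if 4 ≤ sequence.length then PySem.List.slice sequence (some (-4)) none else sequence
    match pvFindPattern seq_tuple pvPatternsA with
    | some name => name
    | none =>
      let _t_to_s := pvCountTrans sequence "T" "S"
      let s_to_d := pvCountTrans sequence "S" "D"
      let d_to_t := pvCountTrans sequence "D" "T"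
      if d_to_t > 0 then "resolving"
      else if s_to_d > 0 then "building_tension"
      else "static"

-- ===== PORT B =====
def pvPatternsB : PySem.Dict (List String) String :=
  PySem.Dict.ofList
    [(["T","S","D","T"], "classical_cadence"),
     (["T","D","T"], "simple_resolution"),
     (["S","D","T"], "cadential"),
     (["T","S","T"], "plagal_motion")]

-- the single-pass loop `for a, b in zip(sequence, sequence[1:]): ...` with two flags
def pvFlagStep (p : Bool × Bool) (ab : String × String) : Bool × Bool :=
  if ab.1 = "D" ∧ ab.2 = "T" then (true, p.2)
  else if ab.1 = "S" ∧ ab.2 = "D" then (p.1, true)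
  else p

def analyze_harmonic_rhythm_py_alt (sequence : List String) : String :=
  if sequence = [] then "empty"
  else
    let tail := if 4 ≤ sequence.length then PySem.List.slice sequence (some (-4)) none else sequence
    match PySem.Dict.get? pvPatternsB tail with
    | some name => name
    | none =>
      let flags := (sequence.zip sequence.tail).foldl pvFlagStep (false, false)
      if flags.1 then "resolving"
      else if flags.2 then "building_tension"
      else "static"

-- ===== PRECONDITION & SPEC =====
def Spec_analyze_harmonic_rhythm_py (sequence : List String) (out : String) : Prop := out = analyze_harmonic_rhythm_py_alt sequence
instance (sequence : List String) (out : String) : Decidable (Spec_analyze_harmonic_rhythm_py sequence out) := by unfold Spec_analyze_harmonic_rhythm_py; infer_instance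

-- ===== CLAIM (what is proved, stated in full; the proofs are below) =====
def Claim_equal_analyze_harmonic_rhythm_py : Prop := ∀ (sequence : List String), Dom_analyze_harmonic_rhythm_py sequence → Spec_analyze_harmonic_rhythm_py sequence (analyze_harmonic_rhythm_py sequence)

-- ===== LEMMAS AND PROOFS =====

-- both lookups are the same first-match search of the same literal table
lemma find_eq_get (seq : List String) :
    pvFindPattern seq pvPatternsA = PySem.Dict.get? pvPatternsB seq := by
  by_cases h1 : seq = ["T","S","D","T"]
  · subst h1; rfl
  by_cases h2 : seq = ["T","D","T"]
  · subst h2; rfl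
  by_cases h3 : seq = ["S","D","T"]
  · subst h3; rfl
  by_cases h4 : seq = ["T","S","T"]
  · subst h4; rfl
  simp [pvFindPattern, pvPatternsA, pvPatternsB, PySem.Dict.get?, PySem.Dict.ofList,
    PySem.Dict.update, PySem.Dict.empty, PySem.Dict.insert,
    PySem.Dict.contains, h1, h2, h3, h4]
  exact ⟨fun h => h1 h.symm, fun h => h2 h.symm, fun h => h3 h.symm, fun h => h4 h.symm⟩

-- the fused loop computes the two existence flags
lemma flags_eq (l : List (String × String)) (p : Bool × Bool) :
    l.foldl pvFlagStep p =
      (p.1 || l.any (fun x => x.1 == "D" && x.2 == "T"),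
       p.2 || l.any (fun x => x.1 == "S" && x.2 == "D")) := by
  induction l generalizing p with
  | nil => simp
  | cons x l ih =>
    simp only [List.foldl_cons, List.any_cons, ih]
    by_cases h1 : x.1 = "D" ∧ x.2 = "T"
    · have h2 : ¬(x.1 = "S" ∧ x.2 = "D") := by
        rintro ⟨hS, _⟩; rw [hS] at h1; exact absurd h1.1 (by decide)
      simp [pvFlagStep, h1]
    · by_cases h2 : x.1 = "S" ∧ x.2 = "D"
      · simp [pvFlagStep, h2]
      · simp only [pvFlagStep, if_neg h1, if_neg h2]
        have e1 : (x.1 == "D" && x.2 == "T") = false := by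
          simp [not_and] at h1 ⊢; intro h; exact h1 h
        have e2 : (x.1 == "S" && x.2 == "D") = false := by
          simp [not_and] at h2 ⊢; intro h; exact h2 h
        simp [e1, e2]

-- a positive transition count is existence of the adjacent pair
lemma count_pos_iff (xs : List String) (a b : String) :
    (0 < pvCountTrans xs a b) ↔ (a, b) ∈ xs.zip xs.tail := by
  unfold pvCountTrans
  have hf : (fun i => if PySem.List.pyGetD xs i "" = a ∧ PySem.List.pyGetD xs (i + 1) "" = b then (1:Int) else 0)
      = fun i => if (decide (PySem.List.pyGetD xs i "" = a ∧ PySem.List.pyGetD xs (i + 1) "" = b)) = true then (1:Int) else 0 := by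
    funext i; simp
  rw [hf, PySem.List.sum_map_ite_one_zero]
  rw [show ∀ m : Nat, (0:Int) < m ↔ 0 < m from fun m => by exact_mod_cast Iff.rfl]
  rw [List.countP_pos_iff]
  constructor
  · rintro ⟨i, hmem, hp⟩
    rw [PySem.List.mem_pyRange_one] at hmem
    simp only [decide_eq_true_eq] at hp
    have h0 : 0 ≤ i := hmem.1
    have hlt : i < (xs.length : Int) - 1 := hmem.2
    rw [PySem.List.pyGetD_eq_getElem xs "" h0 (by omega),
        PySem.List.pyGetD_eq_getElem xs "" (by omega) (by omega)] at hp
    rw [List.mem_iff_getElem]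
    refine ⟨i.toNat, by simp [List.length_zip, List.length_tail]; omega, ?_⟩
    rw [List.getElem_zip, List.getElem_tail]
    simp only [show (i + 1).toNat = i.toNat + 1 from by omega] at hp
    simp [hp.1, hp.2]
  · intro hmem
    rw [List.mem_iff_getElem] at hmem
    obtain ⟨k, hk, hval⟩ := hmem
    have hk' : k < xs.length - 1 := by
      simpa [List.length_zip, List.length_tail] using hk
    refine ⟨(k : Int), ?_, ?_⟩
    · rw [PySem.List.mem_pyRange_one]; constructor <;> [positivity; omega]
    · rw [List.getElem_zip, List.getElem_tail] at hval
      simp only [decide_eq_true_eq]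
      rw [PySem.List.pyGetD_eq_getElem xs "" (by positivity) (by omega),
          PySem.List.pyGetD_eq_getElem xs "" (by positivity) (by omega)]
      simp only [show ((k:Int)).toNat = k from by omega,
        show ((k:Int) + 1).toNat = k + 1 from by omega]
      exact ⟨congrArg Prod.fst hval, congrArg Prod.snd hval⟩

-- ===== VERDICT (by name: the statement is the Claim_ definition above) =====
theorem analyze_harmonic_rhythm_py_spec : Claim_equal_analyze_harmonic_rhythm_py := by
  intro sequence _
  show analyze_harmonic_rhythm_py sequence = analyze_harmonic_rhythm_py_alt sequence
  unfold analyze_harmonic_rhythm_py analyze_harmonic_rhythm_py_alt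
  by_cases hnil : sequence = []
  · simp [hnil]
  · simp only [hnil, ite_false]
    rw [find_eq_get]
    cases PySem.Dict.get? pvPatternsB
        (if 4 ≤ sequence.length then PySem.List.slice sequence (some (-4)) none else sequence) with
    | some name => rfl
    | none =>
      simp only [flags_eq, Bool.false_or, gt_iff_lt]
      by_cases hD : ("D", "T") ∈ sequence.zip sequence.tail <;>
        by_cases hS : ("S", "D") ∈ sequence.zip sequence.tail <;>
        simp [count_pos_iff, List.any_eq_true, Bool.and_eq_true, beq_iff_eq, hD, hS]
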